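-- pv_equiv track=rewrite | github.com/hghimanshu/CodeForces-problems | 399A-Pages.py | navigationPage
-- ===== SOURCE A (Python) =====
-- def navigationPage(n, p, k, val):
--     l = []
--     if val == "sub":
--         while k != 0:
--             if p > 1:
--                 l.append(p-k)
--             else:
--                 l = []
--             k -=1
--     else:
--         while k != 0:
--             if p <= n:
--                 l.append(p+k)
--             else:
--                 l = []
--             k -=1
--         l.sort()
--     return " ".join([str(i) for i in l])
-- ===== SOURCE B (Python) =====
-- def navigationPage(n, p, k, val):
--     # The in-loop guard of A is invariant, so the result is just one arithmetic run.
--     if val == "sub":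
--         nums = range(p - k, p) if p > 1 else []
--     else:
--         nums = range(p + 1, p + k + 1) if p <= n else []
--     return " ".join(map(str, nums))
-- ===== Notes on version B (the rewrite author's own statement) =====
-- stated objective: simpler
-- what changed: Replaces the counting-down while loops with a per-step reset branch and a final sort by a single closed-form range (the in-loop guard is loop-invariant, and the ascending range makes the sort unnecessary); Pre_ excludes k < 0, where A's 'while k != 0' loop diverges.
import Mathlib
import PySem

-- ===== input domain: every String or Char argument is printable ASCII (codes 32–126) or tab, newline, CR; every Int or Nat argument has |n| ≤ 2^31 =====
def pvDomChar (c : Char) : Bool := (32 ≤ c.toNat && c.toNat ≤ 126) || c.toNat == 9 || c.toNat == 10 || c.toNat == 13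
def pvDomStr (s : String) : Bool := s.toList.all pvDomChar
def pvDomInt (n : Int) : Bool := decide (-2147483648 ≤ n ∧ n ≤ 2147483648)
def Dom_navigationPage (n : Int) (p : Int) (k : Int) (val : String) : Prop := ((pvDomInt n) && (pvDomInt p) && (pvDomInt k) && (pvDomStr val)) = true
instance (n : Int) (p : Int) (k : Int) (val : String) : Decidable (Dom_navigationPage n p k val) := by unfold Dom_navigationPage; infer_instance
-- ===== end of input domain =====

-- B replaces A's counting-down loops (with per-step reset branch) and final sort by one
-- closed-form ascending range; objective: simpler.


-- ===== PORT A =====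
-- 'while k != 0' counting down; fuel = k.toNat (faithful for k ≥ 0, i.e. on Pre_; for k < 0 Python diverges)
def pvSubLoopA : Nat → Int → Int → List Int → List Int
  | 0, _, _, l => l
  | m+1, p, k, l => pvSubLoopA m p (k - 1) (if 1 < p then l ++ [p - k] else [])

def pvAddLoopA : Nat → Int → Int → Int → List Int → List Int
  | 0, _, _, _, l => l
  | m+1, n, p, k, l => pvAddLoopA m n p (k - 1) (if p ≤ n then l ++ [p + k] else [])

def navigationPage (n : Int) (p : Int) (k : Int) (val : String) : String :=
  if val = "sub" then
    PySem.Str.join " " ((pvSubLoopA k.toNat p k []).map PySem.Int.toStr)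
  else
    PySem.Str.join " " ((PySem.List.sorted (pvAddLoopA k.toNat n p k []) (fun x => x) false).map PySem.Int.toStr)

-- ===== PORT B =====
def navigationPage_alt (n : Int) (p : Int) (k : Int) (val : String) : String :=
  let nums : List Int :=
    if val = "sub" then
      if 1 < p then PySem.List.pyRange (p - k) p 1 else []
    else
      if p ≤ n then PySem.List.pyRange (p + 1) (p + k + 1) 1 else []
  PySem.Str.join " " (nums.map PySem.Int.toStr)

-- ===== PRECONDITION & SPEC =====
-- Pre_ excludes k < 0, on which A's 'while k != 0' loop (decrementing k) never terminates.
def Pre_navigationPage (n : Int) (p : Int) (k : Int) (val : String) : Prop := 0 ≤ k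
instance (n : Int) (p : Int) (k : Int) (val : String) : Decidable (Pre_navigationPage n p k val) := by unfold Pre_navigationPage; infer_instance
def pvWitness_navigationPage : Int × Int × Int × String := (5, 3, 2, "sub")

def Spec_navigationPage (n : Int) (p : Int) (k : Int) (val : String) (out : String) : Prop := out = navigationPage_alt n p k val
instance (n : Int) (p : Int) (k : Int) (val : String) (out : String) : Decidable (Spec_navigationPage n p k val out) := by unfold Spec_navigationPage; infer_instance

-- ===== CLAIM (what is proved, stated in full; the proofs are below) =====
def Claim_equal_navigationPage : Prop := ∀ (n : Int) (p : Int) (k : Int) (val : String), Dom_navigationPage n p k val → Pre_navigationPage n p k val → Spec_navigationPage n p k val (navigationPage n p k val)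

-- ===== LEMMAS AND PROOFS =====

lemma pvSubLoopA_pos (p : Int) (h : 1 < p) :
    ∀ (m : Nat) (l : List Int), pvSubLoopA m p m l = l ++ PySem.List.pyRange (p - m) p 1 := by
  intro m
  induction m with
  | zero => intro l; simp [pvSubLoopA, PySem.List.pyRange_one_eq_nil (le_refl p)]
  | succ m ih =>
    intro l
    have hstep : ((m + 1 : Nat) : Int) - 1 = (m : Int) := by push_cast; ring
    have hlt : p - ((m + 1 : Nat) : Int) < p := by push_cast; omega
    simp only [pvSubLoopA, if_pos h, hstep, ih]
    rw [PySem.List.pyRange_one_cons hlt]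
    have h2 : p - ((m + 1 : Nat) : Int) + 1 = p - (m : Int) := by push_cast; ring
    rw [h2]
    simp

lemma pvSubLoopA_nil (p : Int) (h : ¬ 1 < p) :
    ∀ (m : Nat) (k : Int), pvSubLoopA m p k [] = [] := by
  intro m
  induction m with
  | zero => intro k; simp [pvSubLoopA]
  | succ m ih => intro k; simp only [pvSubLoopA, if_neg h]; exact ih _

lemma pvAddLoopA_pos (n p : Int) (h : p ≤ n) :
    ∀ (m : Nat) (l : List Int), pvAddLoopA m n p m l = l ++ PySem.List.pyRange (p + m) p (-1) := by
  intro m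
  induction m with
  | zero => intro l; simp [pvAddLoopA, PySem.List.pyRange_neg_one_eq_nil (le_refl p)]
  | succ m ih =>
    intro l
    have hstep : ((m + 1 : Nat) : Int) - 1 = (m : Int) := by push_cast; ring
    have hlt : p < p + ((m + 1 : Nat) : Int) := by push_cast; omega
    simp only [pvAddLoopA, if_pos h, hstep, ih]
    rw [PySem.List.pyRange_neg_one_cons hlt]
    have h2 : p + ((m + 1 : Nat) : Int) - 1 = p + (m : Int) := by push_cast; ring
    rw [h2]
    simp

lemma pvAddLoopA_nil (n p : Int) (h : ¬ p ≤ n) :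
    ∀ (m : Nat) (k : Int), pvAddLoopA m n p k [] = [] := by
  intro m
  induction m with
  | zero => intro k; simp [pvAddLoopA]
  | succ m ih => intro k; simp only [pvAddLoopA, if_neg h]; exact ih _

lemma pvSortedCountdown (p : Int) (m : Nat) :
    PySem.List.sorted (PySem.List.pyRange (p + m) p (-1)) (fun x => x) false
      = PySem.List.pyRange (p + 1) (p + m + 1) 1 := by
  apply PySem.List.sorted_eq_of_perm_of_pairwise_lt
  · rw [PySem.List.pyRange_neg_one_eq_reverse]
    have h2 : p + (m : Int) + 1 = p + m + 1 := by ring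
    rw [h2]
    exact (List.reverse_perm _).symm
  · exact PySem.List.pairwise_lt_pyRange_one _ _

-- ===== VERDICT (by name: the statement is the Claim_ definition above) =====
theorem navigationPage_spec : Claim_equal_navigationPage := by
  intro n p k val _ hk
  unfold Pre_navigationPage at hk
  lift k to Nat using hk with m
  unfold Spec_navigationPage navigationPage navigationPage_alt
  simp only [Int.toNat_natCast]
  by_cases hval : val = "sub"
  · simp only [if_pos hval]
    by_cases hp : 1 < p
    · rw [pvSubLoopA_pos p hp m []]
      simp [if_pos hp]
    · rw [pvSubLoopA_nil p hp m]
      simp [if_neg hp]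
  · simp only [if_neg hval]
    by_cases hp : p ≤ n
    · rw [pvAddLoopA_pos n p hp m [], List.nil_append, pvSortedCountdown]
      simp [if_pos hp]
    · rw [pvAddLoopA_nil n p hp m]
      simp [if_neg hp, PySem.List.sorted]
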